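-- pv_equiv track=rewrite | github.com/nn9y/smort | smort/src/translate/theory/utils.py | hex_is_char
-- ===== SOURCE A (Python) =====
-- def is_string(s):
--     return isinstance(s, str)
--
-- def hex_is_char(name_indices, input_indices_list):
--     """
--     check for (_ char ⟨H⟩)
--
--     where ⟨H⟩ is an SMT-LIB hexadecimal generated by the following BNF grammar
--
--       ⟨H⟩ ::= #x⟨F⟩ | #x⟨F⟩⟨F⟩ | #x⟨F⟩⟨F⟩⟨F⟩ | #x⟨F⟩⟨F⟩⟨F⟩⟨F⟩ | #x⟨2⟩⟨F⟩⟨F⟩⟨F⟩⟨F⟩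
--       ⟨2⟩ ::= 0 | 1 | 2
--       ⟨F⟩ ::= ⟨2⟩ | 3 | 4 | 5 | 6 | 7 | 8 | 9
--             | a | b | b | d | e | f
--             | A | B | C | D | E | F
--     """
--     if (len(name_indices) != 1) or (len(input_indices_list) != 0):
--         return False
--     hex_str = name_indices[0]
--     if (not is_string(hex_str)) or (len(hex_str) < 3):
--         return False
--     if hex_str[0:2] != '#x':
--         return False
--     number_of_digits = len(hex_str) - 2
--     if number_of_digits > 5:
--         return False
--     st = 2
--     if number_of_digits == 5:
--         h = hex_str[st]
--         if (h < '0') or (h > '2'):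
--             return False
--         st = 3
--     for x in hex_str[st:]:
--         if ('0' <= x <= '9') or ('a' <= x <= 'f') or ('A' <= x <= 'F'):
--             continue
--         else:
--             return False
--     return True
-- ===== SOURCE B (Python) =====
-- HEX_DIGITS = '0123456789abcdefABCDEF'
--
--
-- def _run(t, n):
--     # t must be a run of 1..n hex digits
--     if t == '' or n == 0 or t[0] not in HEX_DIGITS:
--         return False
--     return len(t) == 1 or _run(t[1:], n - 1)
--
--
-- def hex_is_char(name_indices, input_indices_list):
--     if len(name_indices) != 1 or len(input_indices_list) != 0:
--         return False
--     s = name_indices[0]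
--     if not isinstance(s, str) or not s.startswith('#x'):
--         return False
--     body = s[2:]
--     if len(body) == 5:
--         return body[0] in '012' and _run(body[1:], 4)
--     return _run(body, 4)
-- ===== Notes on version B (the rewrite author's own statement) =====
-- stated objective: alternative
-- what changed: Replaces A's prefix-slice compare, digit-count arithmetic with a 5-digit special branch, and the per-character range-test loop by a startswith guard plus a fuel-bounded recursive run matcher that follows the grammar directly (membership in a hex-digit alphabet, length bounded by the recursion fuel).
import Mathlib
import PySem

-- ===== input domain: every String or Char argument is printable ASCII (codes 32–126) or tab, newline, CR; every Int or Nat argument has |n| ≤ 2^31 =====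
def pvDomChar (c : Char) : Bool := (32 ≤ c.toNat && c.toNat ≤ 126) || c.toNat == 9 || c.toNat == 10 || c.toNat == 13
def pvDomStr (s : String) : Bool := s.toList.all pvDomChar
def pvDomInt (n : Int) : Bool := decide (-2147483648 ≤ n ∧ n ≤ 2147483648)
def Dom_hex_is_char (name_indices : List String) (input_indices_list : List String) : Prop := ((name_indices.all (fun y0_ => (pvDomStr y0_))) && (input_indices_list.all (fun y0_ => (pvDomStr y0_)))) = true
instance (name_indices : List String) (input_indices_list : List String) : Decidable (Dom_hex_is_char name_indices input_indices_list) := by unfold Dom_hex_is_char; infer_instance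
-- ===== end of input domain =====

-- B replaces A's digit-count arithmetic and char loop by a fuel-bounded recursive run matcher
-- that follows the SMT-LIB grammar directly (objective: alternative decomposition, same cost).
-- In Lean both isinstance guards are vacuous (arguments are List String).

-- ===== PORT A =====
-- the `for x in hex_str[st:]` loop with early `return False`
def hexALoop : List Char → Bool
  | [] => true
  | x :: xs =>
    if (('0' ≤ x && x ≤ '9') || ('a' ≤ x && x ≤ 'f') || ('A' ≤ x && x ≤ 'F')) then hexALoop xs
    else false

def hex_is_char (name_indices : List String) (input_indices_list : List String) : Bool :=
  if name_indices.length ≠ 1 ∨ input_indices_list.length ≠ 0 then false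
  else
    -- hex_str = name_indices[0] (guarded: length = 1); isinstance(hex_str, str) is always true here
    let hex_str := (PySem.List.pyGetD name_indices 0 "").toList
    if hex_str.length < 3 then false
    else if PySem.List.slice hex_str (some 0) (some 2) ≠ ['#', 'x'] then false
    else
      let number_of_digits := hex_str.length - 2
      if number_of_digits > 5 then false
      else if number_of_digits = 5 then
        -- st = 2; check hex_str[2] ∈ '0'..'2'; st = 3
        let h := PySem.List.pyGetD hex_str 2 ' '
        if h < '0' ∨ '2' < h then false
        else hexALoop (PySem.List.slice hex_str (some 3) none)
      else hexALoop (PySem.List.slice hex_str (some 2) none)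

-- ===== PORT B =====
def pvHexDigits : List Char :=
  ['0','1','2','3','4','5','6','7','8','9','a','b','c','d','e','f','A','B','C','D','E','F']

-- _run(t, n): t is a run of 1..n hex digits
def pvRun : List Char → Nat → Bool
  | [], _ => false
  | c :: rest, n =>
    if n = 0 ∨ ¬ (pvHexDigits.contains c) then false
    else rest.isEmpty || pvRun rest (n - 1)

def hex_is_char_alt (name_indices : List String) (input_indices_list : List String) : Bool :=
  if name_indices.length ≠ 1 ∨ input_indices_list.length ≠ 0 then false
  else
    let s := (PySem.List.pyGetD name_indices 0 "").toList
    if ¬ (['#', 'x'].isPrefixOf s) then false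
    else
      let body := PySem.List.slice s (some 2) none
      if body.length = 5 then
        (['0','1','2'].contains (PySem.List.pyGetD body 0 ' ')) &&
          pvRun (PySem.List.slice body (some 1) none) 4
      else pvRun body 4

-- ===== PRECONDITION & SPEC =====
def Spec_hex_is_char (name_indices : List String) (input_indices_list : List String) (out : Bool) : Prop := out = hex_is_char_alt name_indices input_indices_list
instance (name_indices : List String) (input_indices_list : List String) (out : Bool) : Decidable (Spec_hex_is_char name_indices input_indices_list out) := by unfold Spec_hex_is_char; infer_instance

-- ===== CLAIM (what is proved, stated in full; the proofs are below) =====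
def Claim_equal_hex_is_char : Prop := ∀ (name_indices : List String) (input_indices_list : List String), Dom_hex_is_char name_indices input_indices_list → Spec_hex_is_char name_indices input_indices_list (hex_is_char name_indices input_indices_list)

-- ===== LEMMAS AND PROOFS =====
theorem hexdig_eq (c : Char) :
    (('0' ≤ c && c ≤ '9') || ('a' ≤ c && c ≤ 'f') || ('A' ≤ c && c ≤ 'F'))
      = pvHexDigits.contains c := by
  obtain ⟨⟨⟨n, hn⟩⟩, hv⟩ := c
  rw [Bool.eq_iff_iff]
  simp [pvHexDigits, Char.le_def, Char.ext_iff, UInt32.le_iff_toNat_le, UInt32.ext_iff]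
  omega

theorem mem012_eq (c : Char) :
    (decide ¬ (c < '0' ∨ '2' < c)) = (['0','1','2'].contains c) := by
  obtain ⟨⟨⟨n, hn⟩⟩, hv⟩ := c
  rw [Bool.eq_iff_iff]
  simp [Char.lt_def, Char.ext_iff, UInt32.lt_iff_toNat_lt, UInt32.ext_iff]
  omega

theorem hexALoop_eq_all (l : List Char) :
    hexALoop l = l.all (fun c => pvHexDigits.contains c) := by
  induction l with
  | nil => rfl
  | cons x xs ih =>
    simp only [hexALoop, List.all_cons, ← hexdig_eq x]
    by_cases h : (('0' ≤ x && x ≤ '9') || ('a' ≤ x && x ≤ 'f') || ('A' ≤ x && x ≤ 'F')) = true <;>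
      simp [h, ih]

theorem pvRun_long (l : List Char) (n : Nat) (h : n < l.length) : pvRun l n = false := by
  induction l generalizing n with
  | nil => simp at h
  | cons c rest ih =>
    simp only [pvRun]
    by_cases hc : c ∈ pvHexDigits
    · by_cases hn : n = 0
      · simp [hn]
      · have hrest : rest ≠ [] := by
          intro he; subst he; simp at h; omega
        simp [hn, hc, List.isEmpty_eq_false_iff.mpr hrest,
          ih (n - 1) (by simp at h ⊢; omega)]
    · simp [hc]

theorem pvRun_eq_all (l : List Char) (n : Nat) (hne : l ≠ []) (hlen : l.length ≤ n) :
    pvRun l n = l.all (fun c => pvHexDigits.contains c) := by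
  induction l generalizing n with
  | nil => exact absurd rfl hne
  | cons c rest ih =>
    have hn : n ≠ 0 := by simp at hlen; omega
    simp only [pvRun, List.all_cons]
    by_cases hc : c ∈ pvHexDigits
    · rcases rest with _ | ⟨d, rest'⟩
      · simp [hn, hc]
      · have hl : (d :: rest').length ≤ n - 1 := by simp at hlen ⊢; omega
        simp [hn, hc, ih (n - 1) (by simp) hl]
    · simp [hc]

-- the common core, on the first string's character list
theorem hex_core (l : List Char) :
    (if l.length < 3 then false
     else if PySem.List.slice l (some 0) (some 2) ≠ ['#', 'x'] then false
     else
       if l.length - 2 > 5 then false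
       else if l.length - 2 = 5 then
         if PySem.List.pyGetD l 2 ' ' < '0' ∨ '2' < PySem.List.pyGetD l 2 ' ' then false
         else hexALoop (PySem.List.slice l (some 3) none)
       else hexALoop (PySem.List.slice l (some 2) none))
    = (if ¬ (['#', 'x'].isPrefixOf l) then false
       else
         if (PySem.List.slice l (some 2) none).length = 5 then
           (['0','1','2'].contains (PySem.List.pyGetD (PySem.List.slice l (some 2) none) 0 ' ')) &&
             pvRun (PySem.List.slice (PySem.List.slice l (some 2) none) (some 1) none) 4
         else pvRun (PySem.List.slice l (some 2) none) 4) := by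
  rcases l with _ | ⟨a, _ | ⟨b, body⟩⟩
  · decide
  · simp [List.isPrefixOf, PySem.List.slice, PySem.List.clampIdx]
  · have hsl2 : PySem.List.slice (a :: b :: body) (some 2) none = body := by
      simp [pysem]
    have hsl02 : PySem.List.slice (a :: b :: body) (some 0) (some 2) = [a, b] := by
      simp [pysem]
    by_cases hab : a = '#' ∧ b = 'x'
    · obtain ⟨ha, hb⟩ := hab; subst ha; subst hb
      have hpre : (['#', 'x'].isPrefixOf ('#' :: 'x' :: body)) = true := by
        simp [List.isPrefixOf]
      rcases body with _ | ⟨c, rest⟩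
      · decide
      · have hgl : PySem.List.pyGetD ('#' :: 'x' :: c :: rest) 2 ' ' = c := by
          simp [pysem]
        have hsl3 : PySem.List.slice ('#' :: 'x' :: c :: rest) (some 3) none = rest := by
          simp [pysem]
        have hg0 : PySem.List.pyGetD (c :: rest) 0 ' ' = c := by
          simp [pysem]
        have hsl1 : PySem.List.slice (c :: rest) (some 1) none = rest := by
          simp [pysem]
        rw [hsl2, hsl02, hgl, hsl3, hg0, hsl1]
        simp only [hpre, not_true_eq_false, if_false, List.length_cons, ne_eq]
        split_ifs with h1 h3 h5 hc hB5
        all_goals try omega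
        -- four real goals remain
        · -- more than 5 digits: both reject
          rw [pvRun_long _ 4 (by simp; omega)]
        · -- 5 digits, first char outside '0'..'2': both reject
          rename_i hcc hB5
          have hm : (['0','1','2'].contains c) = false := by
            rw [← mem012_eq c]; simp [hcc]
          rw [hm, Bool.false_and]
        · -- 5 digits, first char in '0'..'2'
          rename_i hcc hB5
          have hm : (['0','1','2'].contains c) = true := by
            rw [← mem012_eq c]; simp [hcc]
          rw [hexALoop_eq_all, pvRun_eq_all rest 4 (by intro h; subst h; simp at hB5) (by omega), hm,
            Bool.true_and]
        · -- 1..4 digits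
          rw [hexALoop_eq_all, pvRun_eq_all (c :: rest) 4 (by simp) (by simp; omega)]
    · -- not a '#x' literal: both sides false
      have hpre : (['#', 'x'].isPrefixOf (a :: b :: body)) = false := by
        simp only [List.isPrefixOf, Bool.and_true,
          Bool.and_eq_false_iff, beq_eq_false_iff_ne, ne_eq]
        by_cases h1 : a = '#'
        · subst h1
          exact Or.inr (fun h => hab ⟨rfl, h.symm⟩)
        · exact Or.inl (fun h => h1 h.symm)
      rw [if_pos (show ¬((['#', 'x'].isPrefixOf (a :: b :: body)) = true) from by simp [hpre])]
      have hne : PySem.List.slice (a :: b :: body) (some 0) (some 2) ≠ ['#', 'x'] := by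
        rw [hsl02]
        intro h
        injection h with h1 h
        injection h with h2 _
        exact hab ⟨h1, h2⟩
      by_cases h3 : (a :: b :: body).length < 3
      · rw [if_pos h3]
      · rw [if_neg h3, if_pos hne]

-- ===== VERDICT (by name: the statement is the Claim_ definition above) =====
theorem hex_is_char_spec : Claim_equal_hex_is_char := by
  intro ni ii _
  unfold Spec_hex_is_char hex_is_char hex_is_char_alt
  by_cases hg : ni.length ≠ 1 ∨ ii.length ≠ 0
  · simp only [if_pos hg]
  · rw [if_neg hg, if_neg hg]
    exact hex_core _
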